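-- pv_equiv track=rewrite | github.com/kurisia0210-bot/Neurograsp_front_back | adl-backend/core/runtime/world_facts.py | _extract_relations_from_text
-- ===== SOURCE A (Python) =====
-- from typing import Any, Dict, Iterable, Optional, Protocol, Tuple
--
-- def _extract_relations_from_text(relation_text: str) -> Dict[str, Optional[str]]:
--     text = (relation_text or "").strip().lower()
--     tokens = text.replace(",", " ").split()
--     inside_target = None
--     on_target = None
--     for idx, token in enumerate(tokens):
--         if token == "inside" and idx + 1 < len(tokens):
--             inside_target = tokens[idx + 1]
--         if token == "on" and idx + 1 < len(tokens):
--             on_target = tokens[idx + 1]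
--     return {"inside": inside_target, "on": on_target}
-- ===== SOURCE B (Python) =====
-- def _extract_relations_from_text(relation_text):
--     tokens = (relation_text or "").strip().lower().replace(",", " ").split()
--     inside_target = None
--     on_target = None
--     # scan backwards over adjacent pairs; first hit from the end == last hit forward
--     for idx in range(len(tokens) - 2, -1, -1):
--         if inside_target is None and tokens[idx] == "inside":
--             inside_target = tokens[idx + 1]
--         if on_target is None and tokens[idx] == "on":
--             on_target = tokens[idx + 1]
--         if inside_target is not None and on_target is not None:
--             break
--     return {"inside": inside_target, "on": on_target}
-- ===== Notes on version B (the rewrite author's own statement) =====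
-- stated objective: alternative
-- what changed: Forward full scan keeping the last match is replaced by a backward scan over adjacent token pairs that records the first match from the end and breaks as soon as both targets are found.
import Mathlib
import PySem

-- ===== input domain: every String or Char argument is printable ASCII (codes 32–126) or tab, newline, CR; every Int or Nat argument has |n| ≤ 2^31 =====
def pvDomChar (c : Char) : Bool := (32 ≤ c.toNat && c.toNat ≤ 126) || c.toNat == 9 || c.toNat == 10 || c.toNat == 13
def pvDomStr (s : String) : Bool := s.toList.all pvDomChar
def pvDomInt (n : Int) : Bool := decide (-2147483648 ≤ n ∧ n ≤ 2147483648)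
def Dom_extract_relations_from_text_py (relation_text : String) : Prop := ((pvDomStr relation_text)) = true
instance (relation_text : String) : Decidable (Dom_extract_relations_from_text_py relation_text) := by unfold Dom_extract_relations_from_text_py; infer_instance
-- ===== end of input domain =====

-- B changes the decomposition: a backward early-terminating scan over adjacent token pairs instead of A's forward full scan keeping the last match; same normalization, return value only.

-- ===== PORT A =====
-- loop body of A's 'for idx, token in enumerate(tokens)' (tokens passed explicitly)
def pvStepA (tokens : List String) (st : Option String × Option String) (p : Int × String) :
    Option String × Option String :=
  let st1 := if p.2 == "inside" && decide (p.1 + 1 < (tokens.length : Int)) then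
      (some (PySem.List.pyGetD tokens (p.1 + 1) ""), st.2) else st
  if p.2 == "on" && decide (p.1 + 1 < (tokens.length : Int)) then
      (st1.1, some (PySem.List.pyGetD tokens (p.1 + 1) "")) else st1

def extract_relations_from_text_py (relation_text : String) : List (String × Option String) :=
  let text := PySem.Str.lower (PySem.Str.strip relation_text)
  let tokens := PySem.Str.split₀ (PySem.Str.replace text "," " ")
  let st := (PySem.List.enumerate tokens).foldl (pvStepA tokens) (none, none)
  [("inside", st.1), ("on", st.2)]

-- ===== PORT B =====
-- B's backward index loop 'for idx in range(len(tokens)-2, -1, -1)' reads exactly the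
-- adjacent pairs (tokens[idx], tokens[idx+1]) from the end; ported as recursion over
-- (tokens.zip tokens.tail).reverse, with B's early 'break' as an early return.
def pvAltLoop : List (String × String) → Option String × Option String → Option String × Option String
  | [], st => st
  | (t, nxt) :: rest, st =>
    let i := if st.1.isNone && t == "inside" then some nxt else st.1
    let o := if st.2.isNone && t == "on" then some nxt else st.2
    if i.isSome && o.isSome then (i, o) else pvAltLoop rest (i, o)

def extract_relations_from_text_py_alt (relation_text : String) : List (String × Option String) :=
  let tokens := PySem.Str.split₀ (PySem.Str.replace (PySem.Str.lower (PySem.Str.strip relation_text)) "," " ")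
  let st := pvAltLoop ((tokens.zip tokens.tail).reverse) (none, none)
  [("inside", st.1), ("on", st.2)]

-- ===== PRECONDITION & SPEC =====
def Spec_extract_relations_from_text_py (relation_text : String) (out : List (String × Option String)) : Prop := out = extract_relations_from_text_py_alt relation_text
instance (relation_text : String) (out : List (String × Option String)) : Decidable (Spec_extract_relations_from_text_py relation_text out) := by unfold Spec_extract_relations_from_text_py; infer_instance

-- ===== CLAIM (what is proved, stated in full; the proofs are below) =====
def Claim_equal_extract_relations_from_text_py : Prop := ∀ (relation_text : String), Dom_extract_relations_from_text_py relation_text → Spec_extract_relations_from_text_py relation_text (extract_relations_from_text_py relation_text)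

-- ===== LEMMAS AND PROOFS =====

-- "keep the last match" step over an adjacent pair, per key
def pvG (k : String) (a : Option String) (q : String × String) : Option String :=
  if q.1 == k then some q.2 else a

-- "keep the first match" (guarded) step, per key
def pvGB (k : String) (a : Option String) (q : String × String) : Option String :=
  if a.isNone && q.1 == k then some q.2 else a

lemma pvGB_const (k : String) (ps : List (String × String)) (v : String) :
    ps.foldl (pvGB k) (some v) = some v := by
  induction ps with
  | nil => rfl
  | cons q ps ih => simpa [pvGB] using ih

lemma pvRevFold (k : String) (r : List (String × String)) :
    r.foldl (pvGB k) none = r.reverse.foldl (pvG k) none := by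
  induction r with
  | nil => rfl
  | cons q r ih =>
    by_cases h : q.1 == k
    · simp [pvGB, h, pvGB_const, List.foldl_append, pvG]
    · simp [pvGB, h, ih, List.foldl_append, pvG]

lemma pvAltLoop_eq_foldl (ps : List (String × String)) (st : Option String × Option String) :
    pvAltLoop ps st = ps.foldl (fun s q => (pvGB "inside" s.1 q, pvGB "on" s.2 q)) st := by
  induction ps generalizing st with
  | nil => rfl
  | cons q ps ih =>
    obtain ⟨t, nxt⟩ := q
    show (let i := if st.1.isNone && t == "inside" then some nxt else st.1
          let o := if st.2.isNone && t == "on" then some nxt else st.2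
          if i.isSome && o.isSome then (i, o) else pvAltLoop ps (i, o)) = _
    simp only [List.foldl_cons]
    set i := if st.1.isNone && t == "inside" then some nxt else st.1 with hi
    set o := if st.2.isNone && t == "on" then some nxt else st.2 with ho
    have hstep : (pvGB "inside" st.1 (t, nxt), pvGB "on" st.2 (t, nxt)) = (i, o) := by
      simp [pvGB, hi, ho]
    rw [hstep]
    split_ifs with h
    · obtain ⟨v, hv⟩ := Option.isSome_iff_exists.mp (by exact (Bool.and_eq_true _ _ ▸ h).1)
      obtain ⟨w, hw⟩ := Option.isSome_iff_exists.mp (by exact (Bool.and_eq_true _ _ ▸ h).2)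
      rw [hv, hw,
        PySem.List.foldl_prod_mk (f := pvGB "inside") (g := pvGB "on"),
        pvGB_const, pvGB_const]
    · exact ih (i, o)

lemma pvFoldA_eq (tokens : List String) :
    ∀ (cur pre : List String) (st : Option String × Option String), tokens = pre ++ cur →
    (PySem.List.enumerate cur (pre.length : Int)).foldl (pvStepA tokens) st
      = (cur.zip cur.tail).foldl (fun s q => (pvG "inside" s.1 q, pvG "on" s.2 q)) st := by
  intro cur
  induction cur with
  | nil => intro pre st h; simp [PySem.List.enumerate]
  | cons t cur ih =>
    intro pre st h
    rw [PySem.List.enumerate_cons]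
    have hlen : ((pre.length : Int) + 1) = (((pre ++ [t]).length : Nat) : Int) := by
      simp
    cases cur with
    | nil =>
      have hguard : ¬ ((pre.length : Int) + 1 < (tokens.length : Int)) := by
        subst h; simp
      simp only [List.foldl_cons]
      have : pvStepA tokens st ((pre.length : Int), t) = st := by
        simp [pvStepA, hguard]
      rw [this, hlen, ih (pre ++ [t]) st (by simp [h])]
      simp
    | cons nxt rest =>
      have hguard : ((pre.length : Int) + 1 < (tokens.length : Int)) := by
        subst h; simp only [List.length_append, List.length_cons]; push_cast; omega
      have hget : PySem.List.pyGetD tokens ((pre.length : Int) + 1) "" = nxt := by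
        have : ((pre.length : Int) + 1) = (((pre.length + 1 : Nat)) : Int) := by push_cast; ring
        rw [this, PySem.List.pyGetD_natCast]
        subst h
        rw [List.getD_eq_getElem?_getD]
        rw [List.getElem?_append_right (by omega)]
        simp
      have hstep : pvStepA tokens st ((pre.length : Int), t)
          = (pvG "inside" st.1 (t, nxt), pvG "on" st.2 (t, nxt)) := by
        by_cases h1 : t == "inside" <;> by_cases h2 : t == "on"
        · simp only [beq_iff_eq] at h1 h2
          rw [h1] at h2
          exact absurd h2 (by decide)
        all_goals simp [pvStepA, pvG, h1, h2, hguard, hget]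
      simp only [List.foldl_cons, hstep]
      rw [hlen, ih (pre ++ [t]) _ (by simp [h])]
      simp

-- ===== VERDICT (by name: the statement is the Claim_ definition above) =====
theorem extract_relations_from_text_py_spec : Claim_equal_extract_relations_from_text_py := by
  intro s _
  unfold Spec_extract_relations_from_text_py
  simp only [extract_relations_from_text_py, extract_relations_from_text_py_alt]
  set tokens := PySem.Str.split₀ (PySem.Str.replace (PySem.Str.lower (PySem.Str.strip s)) "," " ") with htok
  have hA := pvFoldA_eq tokens tokens [] (none, none) (by simp)
  simp only [List.length_nil, Nat.cast_zero] at hA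
  have hB : pvAltLoop ((tokens.zip tokens.tail).reverse) (none, none)
      = (tokens.zip tokens.tail).foldl (fun s q => (pvG "inside" s.1 q, pvG "on" s.2 q)) (none, none) := by
    rw [pvAltLoop_eq_foldl]
    rw [PySem.List.foldl_prod_mk (f := pvGB "inside") (g := pvGB "on"),
        PySem.List.foldl_prod_mk (f := pvG "inside") (g := pvG "on")]
    rw [pvRevFold, pvRevFold, List.reverse_reverse]
  rw [hA, hB]
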